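-- pv_equiv track=rewrite | github.com/cameronaaron/aeae | aeae.py | dccp
-- ===== SOURCE A (Python) =====
-- langdict = {'æ': 0, 'ä': 1, 'â': 2, 'å': 3, 'ă': 4, 'ạ': 5, 'ą': 6, 'a': 7,
--             '€': 8, 'ę': 9, 'ê': 10, 'ĕ': 11, 'ė': 12, 'ë': 13, '¬': 14, 'e': 15}
--
-- def dccp(encoded_str):
--     decoded_text = ""
--     for i in range(0, len(encoded_str), 2):  # Process two hexadecimal digits at a time
--         hex_value = encoded_str[i:i+2]
--         int_value = int(hex_value, 16)  # Convert hex to int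
--         for key, value in langdict.items():  # Find matching value in langdict
--             if value == int_value:
--                 decoded_text += key
--                 break
--     return decoded_text
-- ===== SOURCE B (Python) =====
-- # The 16 langdict keys laid out by their code value: decoding a nibble is direct
-- # indexing, no dictionary or search at all.
-- ALPHABET = "\u00e6\u00e4\u00e2\u00e5\u0103\u1ea1\u0105a\u20ac\u0119\u00ea\u0115\u0117\u00eb\u00ace"
--
-- def dccp(encoded_str):
--     pieces = []
--     s = encoded_str
--     while s:                      # consume the string two characters at a time
--         v = int(s[:2], 16)
--         if 0 <= v < 16:           # values outside the table decode to nothing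
--             pieces.append(ALPHABET[v])
--         s = s[2:]
--     return ''.join(pieces)
-- ===== Notes on version B (the rewrite author's own statement) =====
-- stated objective: simpler
-- what changed: B drops the lookup structure entirely: since langdict's values are exactly 0..15 in key order, decoding a chunk is direct indexing into a 16-character table (ALPHABET[v] guarded by 0 <= v < 16), and the index loop over range(0,len,2) with string concatenation becomes a while loop that consumes the string two characters at a time, collecting pieces and joining once; Pre_ excludes exactly the inputs where int(chunk,16) raises ValueError.
import Mathlib
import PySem

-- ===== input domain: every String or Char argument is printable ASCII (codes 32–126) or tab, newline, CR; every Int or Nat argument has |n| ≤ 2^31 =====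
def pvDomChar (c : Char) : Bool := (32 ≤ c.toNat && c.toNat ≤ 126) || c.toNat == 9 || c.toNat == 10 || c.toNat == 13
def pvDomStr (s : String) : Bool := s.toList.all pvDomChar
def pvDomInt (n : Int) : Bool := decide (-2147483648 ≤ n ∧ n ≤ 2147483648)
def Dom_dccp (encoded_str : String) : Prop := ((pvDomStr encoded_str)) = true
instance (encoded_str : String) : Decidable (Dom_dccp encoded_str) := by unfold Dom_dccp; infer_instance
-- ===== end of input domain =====

-- B replaces A's per-chunk linear scan of langdict by direct indexing into a 16-character table
-- (langdict's values are exactly 0..15 in key order) and A's index loop + string concatenation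
-- by a while loop consuming the string two characters at a time, joined once (objective: simpler).

-- ===== PORT A =====
-- langdict, as its (key, value) item list; keys ported as List Char (string concatenation is
-- ported on List Char, per the PySem convention).
def langItems : List (List Char × Int) :=
  [(['æ'], 0), (['ä'], 1), (['â'], 2), (['å'], 3), (['ă'], 4), (['ạ'], 5), (['ą'], 6), (['a'], 7),
   (['€'], 8), (['ę'], 9), (['ê'], 10), (['ĕ'], 11), (['ė'], 12), (['ë'], 13), (['¬'], 14), (['e'], 15)]

-- A's inner 'for key, value in langdict.items(): if value == int_value: … break' loop
def dccpScan : List (List Char × Int) → Int → List Char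
  | [], _ => []
  | (key, value) :: rest, v => if value == v then key else dccpScan rest v

def dccp (encoded_str : String) : String :=
  let cs := encoded_str.toList
  let decoded := (PySem.List.pyRange 0 (cs.length : Int) 2).foldl
    (fun acc i =>
      let hexValue := PySem.List.slice cs (some i) (some (i + 2))
      -- int(hex_value, 16); ValueError (none) excluded by Pre_dccp, .getD 0 unreachable there
      let intValue := (PySem.Int.ofCharsBase? hexValue 16).getD 0
      acc ++ dccpScan langItems intValue) []
  String.ofList decoded

-- ===== PORT B =====
-- ALPHABET: the 16 langdict keys laid out by their code value
def pvAlphabet : List Char :=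
  ['æ', 'ä', 'â', 'å', 'ă', 'ạ', 'ą', 'a', '€', 'ę', 'ê', 'ĕ', 'ė', 'ë', '¬', 'e']

-- B's 'while s: v = int(s[:2], 16); if 0 <= v < 16: pieces.append(ALPHABET[v]); s = s[2:]'
def dccpAltGo : List Char → List (List Char) → List (List Char)
  | [], pieces => pieces
  | c :: rest, pieces =>
    let s := c :: rest
    let v := (PySem.Int.ofCharsBase? (PySem.List.slice s none (some 2)) 16).getD 0
    -- ALPHABET[v]: under the guard 0 ≤ v < 16 the index is in range, so .getD ' ' is unreachable
    let pieces' := if 0 ≤ v ∧ v < 16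
      then pieces ++ [[(PySem.List.pyGet? pvAlphabet v).getD ' ']]
      else pieces
    dccpAltGo (PySem.List.slice s (some 2) none) pieces'
  termination_by cs _ => cs.length
  decreasing_by
    rw [PySem.List.slice_from (xs := c :: rest) (a := 2) (by norm_num)]
    simp

def dccp_alt (encoded_str : String) : String :=
  String.ofList (PySem.Chars.join [] (dccpAltGo encoded_str.toList []))

-- ===== PRECONDITION & SPEC =====
-- Pre_: every two-character chunk (odd tail: one character) is accepted by Python's int(·, 16);
-- elsewhere A raises ValueError.  On chunks of length ≤ 2 over the ASCII domain, int(·, 16) accepts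
-- exactly: a hex digit, two hex digits, or a hex digit with a sign or whitespace before it or
-- whitespace after it ('0x', '_', etc. need ≥ 3 characters) — checked exhaustively against CPython.
def pvIsHexDigit (c : Char) : Bool :=
  ('0' ≤ c && c ≤ '9') || ('a' ≤ c && c ≤ 'f') || ('A' ≤ c && c ≤ 'F')
def pvIsPyWs (c : Char) : Bool :=
  c == ' ' || c == '\t' || c == '\n' || c == '\r' || c == '\x0b' || c == '\x0c'
def pvChunksOk : List Char → Bool
  | [] => true
  | [c] => pvIsHexDigit c
  | c1 :: c2 :: rest =>
    ((pvIsHexDigit c1 && pvIsHexDigit c2) ||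
     ((c1 == '+' || c1 == '-' || pvIsPyWs c1) && pvIsHexDigit c2) ||
     (pvIsHexDigit c1 && pvIsPyWs c2)) && pvChunksOk rest
def Pre_dccp (encoded_str : String) : Prop := pvChunksOk encoded_str.toList = true
instance (encoded_str : String) : Decidable (Pre_dccp encoded_str) := by unfold Pre_dccp; infer_instance
def pvWitness_dccp : String := "0f0e"

def Spec_dccp (encoded_str : String) (out : String) : Prop := out = dccp_alt encoded_str
instance (encoded_str : String) (out : String) : Decidable (Spec_dccp encoded_str out) := by unfold Spec_dccp; infer_instance

-- ===== CLAIM (what is proved, stated in full; the proofs are below) =====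
def Claim_equal_dccp : Prop := ∀ (encoded_str : String), Dom_dccp encoded_str → Pre_dccp encoded_str → Spec_dccp encoded_str (dccp encoded_str)

-- ===== LEMMAS AND PROOFS =====

-- the chunk's decoded value, shared shape of both sides' per-chunk computation
def pvVal (chunk : List Char) : Int := (PySem.Int.ofCharsBase? chunk 16).getD 0

-- A's scan returns nothing when no langdict value matches
theorem scan_nomatch (l : List (List Char × Int)) (v : Int) (h : ∀ kv ∈ l, kv.2 ≠ v) :
    dccpScan l v = [] := by
  induction l with
  | nil => rfl
  | cons kv rest ih =>
    obtain ⟨k, val⟩ := kv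
    rw [dccpScan, if_neg (by simpa using h (k, val) (by simp))]
    exact ih fun p hp => h p (List.mem_cons_of_mem _ hp)

-- A's linear scan of langdict equals B's guarded table indexing, for every Int
theorem scan_eq_index (v : Int) :
    dccpScan langItems v =
      if 0 ≤ v ∧ v < 16 then [(PySem.List.pyGet? pvAlphabet v).getD ' '] else [] := by
  by_cases h : 0 ≤ v ∧ v < 16
  · obtain ⟨h0, h16⟩ := h
    interval_cases v <;> decide
  · rw [if_neg h]
    apply scan_nomatch
    intro kv hkv
    fin_cases hkv <;> simp <;> omega

-- ''.join is flatten
theorem join_empty_sep (ps : List (List Char)) : PySem.Chars.join [] ps = ps.flatten := by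
  induction ps with
  | nil => rw [PySem.Chars.join_nil]; rfl
  | cons p rest ih =>
    cases rest with
    | nil => rw [PySem.Chars.join_singleton]; simp
    | cons q r => rw [PySem.Chars.join_cons_cons]; simp at ih ⊢; simp [ih]

-- B's loop threads its accumulator on the left
theorem go_acc (cs : List Char) (pieces : List (List Char)) :
    dccpAltGo cs pieces = pieces ++ dccpAltGo cs [] := by
  match cs with
  | [] => rw [dccpAltGo, dccpAltGo]; simp
  | c :: rest =>
    rw [dccpAltGo, dccpAltGo]
    by_cases h : 0 ≤ (PySem.Int.ofCharsBase? (PySem.List.slice (c :: rest) none (some 2)) 16).getD 0 ∧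
        (PySem.Int.ofCharsBase? (PySem.List.slice (c :: rest) none (some 2)) 16).getD 0 < 16
    · have hrec := fun ps => go_acc (PySem.List.slice (c :: rest) (some 2) none) ps
      rw [if_pos h, if_pos h, hrec (pieces ++ _), hrec ([] ++ _)]
      simp
    · rw [if_neg h, if_neg h]
      exact go_acc _ _
  termination_by cs.length
  decreasing_by
    all_goals rw [PySem.List.slice_from (xs := c :: rest) (a := 2) (by norm_num)]; simp

-- the main correspondence: A's flatMap over range(0, len, 2) of the scan equals the flatten of
-- B's while-loop pieces, by induction consuming two characters at a time
theorem range_eq_go (cs : List Char) :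
    (PySem.List.pyRange 0 (cs.length : Int) 2).flatMap
        (fun i => dccpScan langItems (pvVal (PySem.List.slice cs (some i) (some (i + 2)))))
      = (dccpAltGo cs []).flatten := by
  match cs with
  | [] => rw [dccpAltGo]; simp [PySem.List.pyRange_of_pos 0 0 (by norm_num : (0:Int) < 2)]
  | c :: rest =>
    have hdrop : PySem.List.slice (c :: rest) (some 2) none = rest.drop 1 := by
      rw [PySem.List.slice_from (xs := c :: rest) (a := 2) (by norm_num)]; rfl
    have htake : PySem.List.slice (c :: rest) none (some 2) = (c :: rest).take 2 := by
      rw [PySem.List.slice_to (xs := c :: rest) (b := 2) (by norm_num)]; rfl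
    have ih := range_eq_go (rest.drop 1)
    have hn : (0 : Int) < ((c :: rest).length : Int) := by simp
    have hcount : ((((c :: rest).length : Int) - 0 + 2 - 1) / 2).toNat
        = ((rest.drop 1).length + 1) / 2 + 1 := by
      simp only [List.length_cons, List.length_drop]
      push_cast
      omega
    rw [PySem.List.pyRange_of_pos 0 ((c :: rest).length : Int) (by norm_num), if_pos hn, hcount,
        List.range_succ_eq_map, List.map_cons, List.flatMap_cons, List.map_map, List.flatMap_map]
    rw [dccpAltGo]
    rw [go_acc, List.flatten_append, hdrop]
    congr 1
    · -- head chunk: slice cs 0 2 is take 2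
      have h0 : (0:Int) + 2 * ((0:Nat):Int) = 0 := by norm_num
      have hsl : PySem.List.slice (c :: rest) (some ((0:Int) + 2 * ((0:Nat):Int)))
          (some ((0:Int) + 2 * ((0:Nat):Int) + 2)) = (c :: rest).take 2 := by
        rw [h0]
        simp only [zero_add, PySem.List.slice_zero_start]
        exact htake
      rw [hsl, scan_eq_index, htake]
      simp only [pvVal]
      split_ifs <;> simp
    · -- tail chunks: index 2(k+1) into cs is index 2k into cs[2:]
      rw [PySem.List.pyRange_of_pos 0 (((rest.drop 1).length : Int)) (by norm_num)] at ih
      by_cases hlen : (0:Int) < ((rest.drop 1).length : Int)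
      · rw [if_pos hlen] at ih
        have hcount2 : ((((rest.drop 1).length : Int) - 0 + 2 - 1) / 2).toNat
            = ((rest.drop 1).length + 1) / 2 := by omega
        rw [hcount2, List.flatMap_map] at ih
        rw [← ih]
        apply List.flatMap_congr
        intro k hk
        simp only [Function.comp_apply]
        congr 2
        have e1 := PySem.List.slice_natCast_add (c :: rest) (2 * (k + 1)) 2
        have e2 := PySem.List.slice_natCast_add (rest.drop 1) (2 * k) 2
        push_cast at e1 e2 ⊢
        rw [show (0:Int) + 2 * ((k:Int) + 1) = 2 * (k:Int) + 2 by ring,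
            show (2:Int) * (k:Int) + 2 + 2 = 2 * (k:Int) + 2 + 2 by ring]
        rw [show (2:Int) * ((k:Int) + 1) = 2 * (k:Int) + 2 by ring] at e1
        rw [show (0:Int) + 2 * (k:Int) = 2 * (k:Int) by ring]
        rw [e1, e2]
        simp only [List.drop_drop]
        congr 1
        rw [show 2 * (k + 1) = 2 * k + 1 + 1 by ring, List.drop_succ_cons]
        congr 1
        omega
      · -- fewer than one further chunk: both remainders are empty
        rw [if_neg hlen] at ih
        simp only [List.range_zero, List.map_nil, List.flatMap_nil] at ih
        have hz : (rest.drop 1).length = 0 := by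
          by_contra hne
          exact hlen (by exact_mod_cast Nat.pos_of_ne_zero hne)
        have hm : ((rest.drop 1).length + 1) / 2 = 0 := by omega
        rw [hm, List.range_zero, List.flatMap_nil, ← ih]
  termination_by cs.length
  decreasing_by simp

theorem dccp_eq (s : String) : dccp s = dccp_alt s := by
  unfold dccp dccp_alt
  simp only
  rw [PySem.List.foldl_append_eq_flatMap, join_empty_sep, List.nil_append]
  rw [← range_eq_go]
  rfl

-- ===== VERDICT (by name: the statement is the Claim_ definition above) =====
theorem dccp_spec : Claim_equal_dccp := by
  intro s _ _
  exact dccp_eq s
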